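-- pv_equiv track=rewrite | github.com/KDominaki/log-analyzer | core/analyzer.py | analyze_file
-- ===== SOURCE A (Python) =====
-- from typing import Dict, List, Tuple
--
-- def analyze_file(entries: List[Tuple[int, str]]) -> Dict[int, Dict[str, int]]:
--     """
--     For a single file:
--     Return structure:
--     {
--         406: { "Invalid payload format": 2 },
--         401: { "": 3 }
--     }
--     """
--     result: Dict[int, Dict[str, int]] = {}
--
--     for status, msg in entries:
--         if status not in result:
--             result[status] = {}
--         if msg not in result[status]:
--             result[status][msg] = 0
--         result[status][msg] += 1
--
--     return result
-- ===== SOURCE B (Python) =====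
-- def analyze_file(entries):
--     result = {}
--     for status in dict.fromkeys(s for s, _ in entries):
--         msgs = [m for s, m in entries if s == status]
--         result[status] = {m: msgs.count(m) for m in dict.fromkeys(msgs)}
--     return result
-- ===== Notes on version B (the rewrite author's own statement) =====
-- stated objective: alternative
-- what changed: Replaces A's single-pass accumulation into a nested dict-of-dicts by a group-by decomposition: dedup the statuses in first-occurrence order, filter out each status's messages, and build each inner dict by counting every first-occurrence message with list.count.
import Mathlib
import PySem

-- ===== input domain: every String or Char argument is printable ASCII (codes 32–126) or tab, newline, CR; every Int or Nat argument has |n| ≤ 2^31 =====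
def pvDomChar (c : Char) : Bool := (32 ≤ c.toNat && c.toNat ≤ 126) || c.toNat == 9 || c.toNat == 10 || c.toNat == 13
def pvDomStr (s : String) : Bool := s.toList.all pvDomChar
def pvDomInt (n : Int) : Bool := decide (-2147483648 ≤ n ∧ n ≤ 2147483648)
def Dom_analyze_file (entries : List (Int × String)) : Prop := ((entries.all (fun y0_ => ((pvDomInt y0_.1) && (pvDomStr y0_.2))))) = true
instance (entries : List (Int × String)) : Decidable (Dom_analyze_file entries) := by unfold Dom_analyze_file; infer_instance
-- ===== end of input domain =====

-- B replaces A's single-pass nested-dict accumulation by a group-by decomposition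
-- (dedup the statuses, filter each status's messages, count each distinct message);
-- objective: alternative (same result, different algorithm; not claimed faster).

-- ===== PORT A =====
-- literal transliteration of A's loop: result is a dict of dicts, built entry by entry
def analyze_file (entries : List (Int × String)) : List (Int × List (String × Int)) :=
  let result : PySem.Dict Int (PySem.Dict String Int) :=
    entries.foldl
      (fun result p =>
        -- if status not in result: result[status] = {}
        let result := if result.contains p.1 then result else result.insert p.1 PySem.Dict.empty
        let inner := result.getD p.1 PySem.Dict.empty
        -- if msg not in result[status]: result[status][msg] = 0
        let inner := if inner.contains p.2 then inner else inner.insert p.2 0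
        -- result[status][msg] += 1
        result.insert p.1 (inner.insert p.2 (inner.getD p.2 0 + 1)))
      PySem.Dict.empty
  result.items.map (fun q => (q.1, q.2.items))

-- ===== PORT B =====
-- literal transliteration of Source B: for each first-occurrence status, filter its
-- messages and count each first-occurrence message
def analyze_file_alt (entries : List (Int × String)) : List (Int × List (String × Int)) :=
  (PySem.List.dedup (entries.map (·.1))).map (fun status =>
    let msgs := (entries.filter (fun p => p.1 == status)).map (·.2)
    (status, (PySem.List.dedup msgs).map (fun m => (m, ((List.count m msgs : Nat) : Int)))))

-- ===== PRECONDITION & SPEC =====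
def Spec_analyze_file (entries : List (Int × String)) (out : List (Int × List (String × Int))) : Prop := out = analyze_file_alt entries
instance (entries : List (Int × String)) (out : List (Int × List (String × Int))) : Decidable (Spec_analyze_file entries out) := by unfold Spec_analyze_file; infer_instance

-- ===== CLAIM (what is proved, stated in full; the proofs are below) =====
def Claim_equal_analyze_file : Prop := ∀ (entries : List (Int × String)), Dom_analyze_file entries → Spec_analyze_file entries (analyze_file entries)

-- ===== LEMMAS AND PROOFS =====

-- A's loop body, named, and its rewriting as a single nested Dict.modify
def pvStepA (d : PySem.Dict Int (PySem.Dict String Int)) (p : Int × String) :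
    PySem.Dict Int (PySem.Dict String Int) :=
  let d1 := if d.contains p.1 then d else d.insert p.1 PySem.Dict.empty
  let inner := d1.getD p.1 PySem.Dict.empty
  let inner := if inner.contains p.2 then inner else inner.insert p.2 0
  d1.insert p.1 (inner.insert p.2 (inner.getD p.2 0 + 1))

lemma pvStepA_eq_modify (d : PySem.Dict Int (PySem.Dict String Int)) (p : Int × String) :
    pvStepA d p = d.modify p.1 PySem.Dict.empty (fun inn => inn.modify p.2 0 (· + 1)) := by
  rw [show d.modify p.1 PySem.Dict.empty (fun inn => inn.modify p.2 0 (· + 1))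
        = d.insert p.1 ((d.getD p.1 PySem.Dict.empty).insert p.2
            ((d.getD p.1 PySem.Dict.empty).getD p.2 0 + 1)) from rfl]
  unfold pvStepA
  by_cases hs : d.contains p.1 = true
  · rw [if_pos hs]
    dsimp only
    by_cases hm : (d.getD p.1 PySem.Dict.empty).contains p.2 = true
    · rw [if_pos hm]
    · rw [if_neg hm, PySem.Dict.getD_insert_self, PySem.Dict.insert_insert_self,
        PySem.Dict.getD_of_not_contains (d.getD p.1 PySem.Dict.empty) 0 (by simpa using hm)]
  · rw [if_neg hs]
    dsimp only
    rw [PySem.Dict.getD_insert_self,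
      if_neg (by rw [PySem.Dict.contains_empty]; simp),
      PySem.Dict.getD_insert_self, PySem.Dict.insert_insert_self, PySem.Dict.insert_insert_self,
      PySem.Dict.getD_of_not_contains _ _ (by simpa using hs), PySem.Dict.getD_empty]

-- the lookup of one status after A's whole loop is the message-count loop over
-- exactly that status's messages (the same filtered list B builds)
lemma pvGetD_loop (l : List (Int × String)) (d : PySem.Dict Int (PySem.Dict String Int)) (s : Int) :
    (l.foldl (fun d p => d.modify p.1 PySem.Dict.empty (fun inn => inn.modify p.2 0 (· + 1))) d).getD s PySem.Dict.empty
      = ((l.filter (fun p => p.1 == s)).map (·.2)).foldl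
          (fun inn m => inn.modify m 0 (· + 1)) (d.getD s PySem.Dict.empty) := by
  induction l generalizing d with
  | nil => rfl
  | cons p l ih =>
    simp only [List.foldl_cons, List.filter_cons]
    by_cases h : p.1 = s
    · subst h; simp [ih]
    · rw [ih, PySem.Dict.getD_modify, if_neg (fun hh => h hh.symm)]
      simp [h]

theorem analyze_file_spec : Claim_equal_analyze_file := by
  intro entries _
  unfold Spec_analyze_file analyze_file analyze_file_alt
  have hstep : (fun (result : PySem.Dict Int (PySem.Dict String Int)) (p : Int × String) =>
      let result := if result.contains p.1 then result else result.insert p.1 PySem.Dict.empty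
      let inner := result.getD p.1 PySem.Dict.empty
      let inner := if inner.contains p.2 then inner else inner.insert p.2 0
      result.insert p.1 (inner.insert p.2 (inner.getD p.2 0 + 1)))
      = (fun (d : PySem.Dict Int (PySem.Dict String Int)) (p : Int × String) =>
          d.modify p.1 PySem.Dict.empty (fun inn => inn.modify p.2 0 (· + 1))) := by
    funext d p; exact pvStepA_eq_modify d p
  rw [hstep]
  dsimp only
  set res : PySem.Dict Int (PySem.Dict String Int) := entries.foldl
    (fun (d : PySem.Dict Int (PySem.Dict String Int)) (p : Int × String) =>
      d.modify p.1 PySem.Dict.empty (fun inn => inn.modify p.2 0 (· + 1)))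
    PySem.Dict.empty with hres
  have hkeys : res.keys = PySem.Set.ofList (entries.map (·.1)) := by
    rw [hres, PySem.Dict.keys_foldl_modify_key entries (·.1) PySem.Dict.empty
      (fun _ p => fun inn => inn.modify p.2 0 (· + 1)) PySem.Dict.empty]
    rfl
  have hnd : res.keys.Nodup := by
    rw [hres]
    exact PySem.Dict.nodup_keys_foldl_modify_key entries (·.1) PySem.Dict.empty
      (fun _ p => fun inn => inn.modify p.2 0 (· + 1)) PySem.Dict.empty
      (by rw [PySem.Dict.keys_empty]; exact List.nodup_nil)
  rw [PySem.Dict.items_eq_map_keys res hnd PySem.Dict.empty, hkeys, List.map_map]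
  rw [← PySem.List.dedup_eq_ofList]
  apply List.map_congr_left
  intro s _
  dsimp only [Function.comp]
  have hinner : res.getD s PySem.Dict.empty
      = PySem.Dict.counter ((entries.filter (fun p => p.1 == s)).map (·.2)) := by
    rw [hres, pvGetD_loop, PySem.Dict.getD_empty, PySem.Dict.counter_eq_foldl]
  rw [hinner, PySem.Dict.items_counter, ← PySem.List.dedup_eq_ofList]

-- ===== VERDICT (by name: the statement is the Claim_ definition above) =====
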